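-- pv_equiv track=rewrite | github.com/ksiedlarek/codeu | palbit.py | give_kth_binary_palindrome
-- ===== SOURCE A (Python) =====
-- def check_if_binary_palindrome(number):
--     number = (bin(number)).split('0b')[1]
--     reverse = number[::-1]
--     if number == reverse:
--         return True
--     return False
--
-- def give_kth_binary_palindrome(k):
--     is_palindrome = False
--     counter = 1
--     value_to_check = 1
--     if k != 1:
--         while (counter <= k):
--             is_palindrome = check_if_binary_palindrome(value_to_check)
--             if is_palindrome is True:
--                 if counter != k:
--                     counter += 1
--                     value_to_check += 1
--                 elif counter == k:
--                     return value_to_check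
--             else:
--                 value_to_check += 1
--     return value_to_check
-- ===== SOURCE B (Python) =====
-- def give_kth_binary_palindrome(k):
--     # Direct construction: find the bit-length n of the k-th binary palindrome,
--     # then build it by mirroring the top half bits. O(log k) instead of scanning
--     # every integer up to the answer.
--     if k <= 1:
--         return 1
--     rem = k - 2  # 0-based index among binary palindromes of bit-length >= 2
--     n = 2
--     while True:
--         cnt = 2 ** ((n - 1) // 2)  # number of binary palindromes of bit-length n
--         if rem < cnt:
--             break
--         rem -= cnt
--         n += 1
--     h = n - n // 2          # bits in the top half (middle bit included when n is odd)
--     s = n // 2              # bits in the mirrored bottom half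
--     half = 2 ** (h - 1) + rem
--     x = half // 2 ** (n % 2)  # top s bits of half
--     rev = 0
--     for _ in range(s):
--         rev = rev * 2 + x % 2
--         x //= 2
--     return half * 2 ** s + rev
-- ===== Notes on version B (the rewrite author's own statement) =====
-- stated objective: faster
-- what changed: A scans every integer from 1 upward, string-testing each one's binary representation for palindromicity until it has counted k palindromes; B computes the answer directly by finding the bit-length of the k-th binary palindrome from per-length palindrome counts and mirroring the top half bits of its index within that length.
import Mathlib
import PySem

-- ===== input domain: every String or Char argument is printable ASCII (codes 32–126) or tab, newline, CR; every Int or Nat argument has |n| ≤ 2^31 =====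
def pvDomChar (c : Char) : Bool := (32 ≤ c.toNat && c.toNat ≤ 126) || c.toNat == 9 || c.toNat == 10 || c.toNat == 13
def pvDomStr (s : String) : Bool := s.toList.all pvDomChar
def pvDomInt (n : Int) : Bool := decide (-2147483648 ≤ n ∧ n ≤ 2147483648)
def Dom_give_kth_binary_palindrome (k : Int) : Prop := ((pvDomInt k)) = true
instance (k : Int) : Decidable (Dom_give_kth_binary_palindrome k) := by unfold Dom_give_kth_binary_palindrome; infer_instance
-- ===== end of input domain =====

-- B replaces A's one-by-one scan (testing every integer's binary string) by direct
-- construction of the k-th binary palindrome from its bit-length and mirrored half.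

-- ===== PORT A =====

-- little-endian binary digit list of v; (pvBitsLE v).reverse is the digit string of bin(v)
def pvBitsLE (v : Nat) : List Char :=
  if h : v = 0 then [] else (if v % 2 = 1 then '1' else '0') :: pvBitsLE (v / 2)
decreasing_by exact Nat.div_lt_self (Nat.pos_of_ne_zero h) (by norm_num)

def check_if_binary_palindrome (number : Int) : Bool :=
  -- bin(number).split('0b')[1]: the binary digits, most significant first;
  -- exact for number ≥ 1 (A only ever checks value_to_check ≥ 1)
  let number' := (pvBitsLE number.toNat).reverse
  -- reverse = number[::-1]; 'number == reverse' compared as char lists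
  let reverse := number'.reverse
  number' == reverse

-- the while loop; fuel bounds the iteration count (proved sufficient below)
def pvLoopA (fuel : Nat) (counter value_to_check k : Int) : Int :=
  match fuel with
  | 0 => value_to_check
  | f+1 =>
    if counter ≤ k then
      if check_if_binary_palindrome value_to_check then
        (if counter ≠ k then pvLoopA f (counter+1) (value_to_check+1) k
         else value_to_check)
      else pvLoopA f counter (value_to_check+1) k
    else value_to_check

def give_kth_binary_palindrome (k : Int) : Int :=
  if k ≠ 1 then pvLoopA (4*k*k+8).toNat 1 1 k else 1

-- ===== PORT B =====

-- the 'while True' length-finding loop of Source B; each non-breaking pass lowers rem by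
-- cnt ≥ 1, so fuel rem.toNat + 1 (proved sufficient below) bounds the iterations
def pvFindLen (fuel : Nat) (rem : Int) (n : Int) : Int × Int :=
  match fuel with
  | 0 => (n, rem)
  | f+1 =>
    let cnt : Int := 2 ^ ((PySem.Int.floordiv (n-1) 2).toNat)  -- 2**((n-1)//2); exponent ≥ 0 since n ≥ 2
    if rem < cnt then (n, rem)
    else pvFindLen f (rem - cnt) (n+1)

-- rev/x accumulation loop of Source B, run s times
def pvRevLoop : Nat → Int → Int → Int
  | 0, _, rev => rev
  | s+1, x, rev => pvRevLoop s (PySem.Int.floordiv x 2) (rev*2 + PySem.Int.mod x 2)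

def give_kth_binary_palindrome_alt (k : Int) : Int :=
  if k ≤ 1 then 1 else
    let p := pvFindLen ((k-2).toNat + 1) (k - 2) 2
    let n := p.1
    let rem := p.2
    let h := n - PySem.Int.floordiv n 2
    let s := PySem.Int.floordiv n 2
    let half := 2 ^ (h-1).toNat + rem   -- 2**(h-1); exponent ≥ 0 since h ≥ 1
    let x := PySem.Int.floordiv half (2 ^ (PySem.Int.mod n 2).toNat)  -- half // 2**(n%2)
    let rev := pvRevLoop s.toNat x 0    -- for _ in range(s)
    half * 2 ^ s.toNat + rev            -- half * 2**s + rev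

-- ===== PRECONDITION & SPEC =====
def Spec_give_kth_binary_palindrome (k : Int) (out : Int) : Prop := out = give_kth_binary_palindrome_alt k
instance (k : Int) (out : Int) : Decidable (Spec_give_kth_binary_palindrome k out) := by unfold Spec_give_kth_binary_palindrome; infer_instance

-- ===== CLAIM (what is proved, stated in full; the proofs are below) =====
def Claim_equal_give_kth_binary_palindrome : Prop := ∀ (k : Int), Dom_give_kth_binary_palindrome k → Spec_give_kth_binary_palindrome k (give_kth_binary_palindrome k)

-- ===== LEMMAS AND PROOFS =====

def pvBval (c : Char) : Nat := if c = '1' then 1 else 0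
def pvVal (l : List Char) : Nat := l.foldl (fun a c => 2*a + pvBval c) 0

theorem pvVal_from (l : List Char) (a : Nat) :
    l.foldl (fun a c => 2*a + pvBval c) a = a * 2 ^ l.length + pvVal l := by
  induction l generalizing a with
  | nil => simp only [List.foldl_nil, pvVal, List.length_nil, pow_zero]; omega
  | cons c t ih =>
    simp only [List.foldl_cons, List.length_cons, pvVal] at *
    rw [ih, ih (2*0 + pvBval c)]
    ring

theorem pvVal_append (A B : List Char) :
    pvVal (A ++ B) = pvVal A * 2 ^ B.length + pvVal B := by
  unfold pvVal
  rw [List.foldl_append]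
  exact pvVal_from B _

theorem pvVal_cons (c : Char) (l : List Char) :
    pvVal (c :: l) = pvBval c * 2 ^ l.length + pvVal l := by
  have := pvVal_from l (pvBval c)
  unfold pvVal at *
  simpa using this

theorem pvBval_le (c : Char) : pvBval c ≤ 1 := by unfold pvBval; split <;> omega

theorem pvVal_lt (l : List Char) : pvVal l < 2 ^ l.length := by
  induction l with
  | nil => simp [pvVal]
  | cons c t ih =>
    rw [pvVal_cons, List.length_cons, pow_succ]
    have h1 : pvBval c * 2 ^ t.length ≤ 2 ^ t.length := by
      have := pvBval_le c; nlinarith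
    omega

theorem pvVal_reverse_bitsLE (v : Nat) : pvVal (pvBitsLE v).reverse = v := by
  induction v using Nat.strong_induction_on with
  | _ v ih =>
    rw [pvBitsLE]
    by_cases h : v = 0
    · simp [h, pvVal]
    · simp only [h, dif_neg, not_false_iff, List.reverse_cons]
      rw [pvVal_append, ih (v/2) (Nat.div_lt_self (Nat.pos_of_ne_zero h) (by norm_num))]
      have : pvBval (if v % 2 = 1 then '1' else '0') = v % 2 := by
        rcases Nat.mod_two_eq_zero_or_one v with h2 | h2 <;> simp [h2, pvBval]
      simp [pvVal, this]
      omega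

theorem pvBitsLE_length_lt (v : Nat) : v < 2 ^ (pvBitsLE v).length := by
  induction v using Nat.strong_induction_on with
  | _ v ih =>
    rw [pvBitsLE]
    by_cases h : v = 0
    · simp [h]
    · simp only [h, dif_neg, not_false_iff, List.length_cons]
      have := ih (v/2) (Nat.div_lt_self (Nat.pos_of_ne_zero h) (by norm_num))
      rw [pow_succ]
      omega

theorem pvBitsLE_ne_nil (v : Nat) (h : v ≠ 0) : pvBitsLE v ≠ [] := by
  rw [pvBitsLE]; simp [h]

theorem pvBitsLE_length_le (v : Nat) (h : v ≠ 0) : 2 ^ ((pvBitsLE v).length - 1) ≤ v := by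
  induction v using Nat.strong_induction_on with
  | _ v ih =>
    rw [pvBitsLE]
    simp only [h, dif_neg, not_false_iff, List.length_cons, Nat.add_sub_cancel]
    by_cases h2 : v / 2 = 0
    · rw [pvBitsLE, dif_pos h2]
      simpa using Nat.pos_of_ne_zero h
    · have hlt := Nat.div_lt_self (Nat.pos_of_ne_zero h) (show 1 < 2 by norm_num)
      have ihh := ih (v/2) hlt h2
      have hne : pvBitsLE (v/2) ≠ [] := pvBitsLE_ne_nil _ h2
      have hL : 1 ≤ (pvBitsLE (v/2)).length := List.length_pos_of_ne_nil hne
      have : 2 ^ (pvBitsLE (v/2)).length = 2 * 2 ^ ((pvBitsLE (v/2)).length - 1) := by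
        rw [← pow_succ']; congr 1; omega
      omega

theorem pvBitsLE_length_eq (v n : Nat) (h1 : 2 ^ (n-1) ≤ v) (h2 : v < 2 ^ n) (h3 : 1 ≤ n) :
    (pvBitsLE v).length = n := by
  have hv : v ≠ 0 := by have : 1 ≤ 2 ^ (n-1) := Nat.one_le_two_pow; omega
  have a1 := pvBitsLE_length_lt v
  have a2 := pvBitsLE_length_le v hv
  have hL : 1 ≤ (pvBitsLE v).length := List.length_pos_of_ne_nil (pvBitsLE_ne_nil v hv)
  by_contra hne
  rcases Nat.lt_or_ge (pvBitsLE v).length n with h | h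
  · have : 2 ^ (pvBitsLE v).length ≤ 2 ^ (n-1) := Nat.pow_le_pow_right (by norm_num) (by omega)
    omega
  · have : 2 ^ n ≤ 2 ^ ((pvBitsLE v).length - 1) := Nat.pow_le_pow_right (by norm_num) (by omega)
    omega

theorem pvBitsLE_mem (v : Nat) (c : Char) (h : c ∈ pvBitsLE v) : c = '0' ∨ c = '1' := by
  induction v using Nat.strong_induction_on with
  | _ v ih =>
    rw [pvBitsLE] at h
    by_cases hv : v = 0
    · simp [hv] at h
    · simp only [hv, dif_neg, not_false_iff, List.mem_cons] at h
      rcases h with h | h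
      · split at h <;> simp [h]
      · exact ih (v/2) (Nat.div_lt_self (Nat.pos_of_ne_zero hv) (by norm_num)) h

theorem pvBitsLE_getLast (v : Nat) (h : v ≠ 0) (hne : pvBitsLE v ≠ []) :
    (pvBitsLE v).getLast hne = '1' := by
  induction v using Nat.strong_induction_on with
  | _ v ih =>
    by_cases h2 : v / 2 = 0
    · have h1 : v = 1 := by omega
      subst h1
      rw [List.getLast_eq_iff_getLast?_eq_some]
      rw [pvBitsLE]; norm_num; rw [pvBitsLE]; norm_num
    · have hlt := Nat.div_lt_self (Nat.pos_of_ne_zero h) (show 1 < 2 by norm_num)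
      have hne2 : pvBitsLE (v/2) ≠ [] := pvBitsLE_ne_nil _ h2
      have := ih (v/2) hlt h2 hne2
      rw [List.getLast_eq_iff_getLast?_eq_some] at *
      conv_lhs => rw [pvBitsLE, dif_neg h]
      have hstep : ∀ (x : Char) (l : List Char), l ≠ [] → (x :: l).getLast? = l.getLast? := by
        intro x l hl
        cases l with
        | nil => simp at hl
        | cons a t => simp [List.getLast?_cons_cons]
      rw [hstep _ _ hne2]
      exact this

-- MSB list of v
-- head of MSB list is '1'
theorem pvMSB_head (v : Nat) (h : v ≠ 0) :
    ∃ t, (pvBitsLE v).reverse = '1' :: t := by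
  have hne : pvBitsLE v ≠ [] := pvBitsLE_ne_nil v h
  have hlast := pvBitsLE_getLast v h hne
  have : (pvBitsLE v).reverse ≠ [] := by simpa using hne
  rcases List.exists_cons_of_ne_nil this with ⟨a, t, ht⟩
  have ha : a = '1' := by
    have hh := List.head_reverse (l := pvBitsLE v) (by simpa using hne)
    have : (pvBitsLE v).reverse.head (by simpa using hne) = a := by
      simp [ht]
    rw [this] at hh
    rw [hh]
    exact hlast
  exact ⟨t, by rw [ht, ha]⟩

-- value ≥ 2^(len-1) when head is '1'
theorem pvVal_head_one (t : List Char) : 2 ^ t.length ≤ pvVal ('1' :: t) := by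
  rw [pvVal_cons]
  have := pvVal_lt t
  simp [pvBval]

-- inverse: an MSB bit-list with head '1' is the MSB list of its value
theorem pvBitsLE_val (l : List Char)
    (hb : ∀ c ∈ l, c = '0' ∨ c = '1')
    (hh : ∃ t, l = '1' :: t) :
    pvBitsLE (pvVal l) = l.reverse := by
  induction l using List.reverseRecOn with
  | nil => rcases hh with ⟨t, ht⟩; simp at ht
  | append_singleton A c ih =>
    have hvc : pvVal (A ++ [c]) = 2 * pvVal A + pvBval c := by
      rw [pvVal_append]; simp [pvVal]; ring
    rcases hh with ⟨t, ht⟩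
    by_cases hA : A = []
    · subst hA
      simp at ht
      rw [ht.1]
      have h1 : pvVal ([] ++ ['1']) = 1 := by simp [pvVal, pvBval]
      rw [h1]
      rw [pvBitsLE]; norm_num
      rw [pvBitsLE]; norm_num
    · rcases List.exists_cons_of_ne_nil hA with ⟨a0, t0, ht0⟩
      have ha0 : a0 = '1' := by
        rw [ht0] at ht
        simp at ht
        exact ht.1
      have hvA : 1 ≤ pvVal A := by
        rw [ht0, ha0]
        have := pvVal_head_one t0
        have h1 : 1 ≤ 2 ^ t0.length := Nat.one_le_two_pow
        omega
      have ihh := ih (fun c hc => hb c (by simp [hc]))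
        ⟨t0, by rw [ht0, ha0]⟩
      have hcb : c = '0' ∨ c = '1' := hb c (by simp)
      rw [hvc, pvBitsLE]
      have hnz : ¬ (2 * pvVal A + pvBval c = 0) := by omega
      rw [dif_neg hnz]
      have hmod : (2 * pvVal A + pvBval c) % 2 = pvBval c := by
        have := pvBval_le c; omega
      have hdiv : (2 * pvVal A + pvBval c) / 2 = pvVal A := by
        have := pvBval_le c; omega
      rw [hmod, hdiv, ihh]
      rcases hcb with h | h <;> simp [h, pvBval]

-- division drops low bits
theorem pvBitsLE_div_pow (v t : Nat) : pvBitsLE (v / 2 ^ t) = (pvBitsLE v).drop t := by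
  induction t generalizing v with
  | zero => simp
  | succ n ih =>
    have : v / 2 ^ (n+1) = (v / 2) / 2 ^ n := by
      rw [Nat.div_div_eq_div_mul, pow_succ']
    rw [this, ih]
    by_cases hv : v = 0
    · simp [hv, pvBitsLE]
    · conv_rhs => rw [pvBitsLE, dif_neg hv]
      simp

def pvM (v : Nat) : List Char := (pvBitsLE v).reverse
def pvPal (v : Nat) : Prop := (pvBitsLE v).reverse = pvBitsLE v
def pvMir (s x : Nat) : Nat := pvVal (pvM x ++ (List.take s (pvM x)).reverse)

theorem pvRev_short (l : List Char) (h : l.length ≤ 1) : l.reverse = l := by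
  match l, h with
  | [], _ => rfl
  | [a], _ => rfl

theorem pvMirror_of_pal (l : List Char) (s h : Nat) (hp : l.reverse = l)
    (hn : s + h = l.length) (hs : s ≤ h) :
    l = l.take h ++ (l.take s).reverse := by
  conv_lhs => rw [← List.take_append_drop h l]
  congr 1
  have h1 : l.drop h = ((l.drop h).reverse).reverse := by simp
  rw [h1, List.reverse_drop, hp]
  congr 2
  omega

theorem pvPal_of_mirror (H : List Char) (s : Nat) (hs : s ≤ H.length) (hs1 : H.length ≤ s + 1) :
    (H ++ (H.take s).reverse).reverse = H ++ (H.take s).reverse := by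
  have hH : H = H.take s ++ H.drop s := (List.take_append_drop s H).symm
  have hmid : (H.drop s).reverse = H.drop s := pvRev_short _ (by simp; omega)
  calc (H ++ (H.take s).reverse).reverse
      = H.take s ++ H.reverse := by simp
    _ = H.take s ++ ((H.drop s).reverse ++ (H.take s).reverse) := by
        conv_lhs => rw [hH]
        simp
    _ = (H.take s ++ H.drop s) ++ (H.take s).reverse := by rw [hmid, List.append_assoc]
    _ = H ++ (H.take s).reverse := by rw [← hH]

theorem pvM_length (x h : Nat) (hlen : (pvBitsLE x).length = h) : (pvM x).length = h := by
  simp [pvM, hlen]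

theorem pvMir_val (s x h : Nat) (hlen : (pvBitsLE x).length = h) (hs : s ≤ h) :
    pvMir s x = x * 2 ^ s + pvVal ((List.take s (pvM x)).reverse) := by
  unfold pvMir
  rw [pvVal_append]
  have h1 : ((List.take s (pvM x)).reverse).length = s := by
    simp [pvM, hlen]; omega
  rw [h1]
  congr 1
  rw [show pvVal (pvM x) = x from pvVal_reverse_bitsLE x]

theorem pvMir_tail_lt (s x : Nat) : pvVal ((List.take s (pvM x)).reverse) < 2 ^ s := by
  have h1 : ((List.take s (pvM x)).reverse).length ≤ s := by simp
  have := pvVal_lt ((List.take s (pvM x)).reverse)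
  calc pvVal ((List.take s (pvM x)).reverse) < 2 ^ ((List.take s (pvM x)).reverse).length := this
    _ ≤ 2 ^ s := Nat.pow_le_pow_right (by norm_num) h1

theorem pvMir_bits (s x h : Nat) (hx : x ≠ 0) (hlen : (pvBitsLE x).length = h) (hs : s ≤ h) :
    pvBitsLE (pvMir s x) = (pvM x ++ (List.take s (pvM x)).reverse).reverse := by
  unfold pvMir
  apply pvBitsLE_val
  · intro c hc
    simp only [List.mem_append, List.mem_reverse] at hc
    rcases hc with hc | hc
    · exact pvBitsLE_mem x c (by simpa [pvM] using hc)
    · exact pvBitsLE_mem x c (by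
        have := List.mem_of_mem_take hc
        simpa [pvM] using this)
  · rcases pvMSB_head x hx with ⟨t, ht⟩
    exact ⟨t ++ (List.take s (pvM x)).reverse, by rw [show pvM x = '1' :: t from ht]; simp⟩

theorem pvMir_pal (s x h : Nat) (hx : x ≠ 0) (hlen : (pvBitsLE x).length = h)
    (hs : s ≤ h) (hs1 : h ≤ s + 1) : pvPal (pvMir s x) := by
  unfold pvPal
  rw [pvMir_bits s x h hx hlen hs]
  rw [List.reverse_reverse]
  have := pvPal_of_mirror (pvM x) s (by rw [pvM_length x h hlen]; omega) (by rw [pvM_length x h hlen]; omega)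
  exact this.symm

theorem pvMir_lb (s x h : Nat) (hlen : (pvBitsLE x).length = h) (hs : s ≤ h) (hx : x ≠ 0) :
    2 ^ (h + s - 1) ≤ pvMir s x := by
  rw [pvMir_val s x h hlen hs]
  have h1 : 2 ^ (h - 1) ≤ x := by rw [← hlen]; exact pvBitsLE_length_le x hx
  have : 2 ^ (h - 1) * 2 ^ s ≤ x * 2 ^ s := Nat.mul_le_mul_right _ h1
  rw [← pow_add] at this
  have he : h - 1 + s = h + s - 1 := by
    have : 1 ≤ h := by
      by_contra hc
      push_neg at hc
      interval_cases h
      · rw [← hlen] at *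
        have := pvBitsLE_ne_nil x hx
        simp_all [List.length_eq_zero_iff]
    omega
  rw [he] at this
  omega

theorem pvMir_ub (s x h : Nat) (hlen : (pvBitsLE x).length = h) (hs : s ≤ h) :
    pvMir s x < 2 ^ (h + s) := by
  rw [pvMir_val s x h hlen hs]
  have h1 : x < 2 ^ h := by rw [← hlen]; exact pvBitsLE_length_lt x
  have h2 := pvMir_tail_lt s x
  have : x * 2 ^ s + pvVal ((List.take s (pvM x)).reverse) < (x + 1) * 2 ^ s := by nlinarith
  calc x * 2 ^ s + pvVal ((List.take s (pvM x)).reverse) < (x+1) * 2 ^ s := this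
    _ ≤ 2 ^ h * 2 ^ s := Nat.mul_le_mul_right _ (by omega)
    _ = 2 ^ (h + s) := by rw [pow_add]

theorem pvMir_mono (s x x' hx hx' : Nat) (hlx : (pvBitsLE x).length = hx)
    (hlx' : (pvBitsLE x').length = hx') (hsx : s ≤ hx) (hsx' : s ≤ hx') (hlt : x < x') :
    pvMir s x < pvMir s x' := by
  rw [pvMir_val s x hx hlx hsx, pvMir_val s x' hx' hlx' hsx']
  have h2 := pvMir_tail_lt s x
  nlinarith

theorem pvPal_eq_mir (v s h : Nat) (hp : pvPal v) (hv : v ≠ 0)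
    (hlen : (pvBitsLE v).length = s + h) (hs : s ≤ h) :
    v = pvMir s (v / 2 ^ s) ∧ (pvBitsLE (v / 2 ^ s)).length = h := by
  have hM : (pvM v).length = s + h := by simp [pvM, hlen]
  have hMp : (pvM v).reverse = pvM v := by
    unfold pvM pvPal at *
    rw [List.reverse_reverse, hp]
  have hsplit := pvMirror_of_pal (pvM v) s h hMp (by omega) hs
  have hdiv : pvBitsLE (v / 2 ^ s) = (pvBitsLE v).drop s := pvBitsLE_div_pow v s
  have hMx : pvM (v / 2 ^ s) = (pvM v).take h := by
    unfold pvM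
    rw [hdiv, List.reverse_drop, hlen]
    congr 1
    omega
  have hlx : (pvBitsLE (v / 2 ^ s)).length = h := by
    rw [hdiv]; simp [hlen]
  refine ⟨?_, hlx⟩
  have : pvM v = pvM (v / 2 ^ s) ++ ((pvM (v / 2 ^ s)).take s).reverse := by
    rw [hMx, List.take_take, show min s h = s from by omega]
    exact hsplit
  have hval : pvVal (pvM v) = pvMir s (v / 2 ^ s) := by
    rw [this]; rfl
  have hv2 : pvVal (pvM v) = v := pvVal_reverse_bitsLE v
  omega

-- no palindrome strictly between mirrors of consecutive halves of the same bit-length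
theorem pvGap_same (s x h v : Nat) (hx : x ≠ 0)
    (hl1 : (pvBitsLE x).length = h) (hl2 : (pvBitsLE (x+1)).length = h)
    (hs : s ≤ h) (hs1 : h ≤ s + 1)
    (hlo : pvMir s x < v) (hhi : v < pvMir s (x+1)) : ¬ pvPal v := by
  intro hp
  have hv0 : v ≠ 0 := by
    have := pvMir_lb s x h hl1 hs hx
    have : 1 ≤ 2 ^ (h + s - 1) := Nat.one_le_two_pow
    omega
  have hvlen : (pvBitsLE v).length = s + h := by
    apply pvBitsLE_length_eq
    · have := pvMir_lb s x h hl1 hs hx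
      have he : s + h - 1 = h + s - 1 := by omega
      rw [he]
      omega
    · have := pvMir_ub s (x+1) h hl2 hs
      have he : s + h = h + s := by omega
      rw [he]
      omega
    · have : 1 ≤ h := by
        by_contra hc
        push_neg at hc
        interval_cases h
        · have := pvBitsLE_ne_nil x hx
          simp_all [List.length_eq_zero_iff]
      omega
  obtain ⟨heq, hlq⟩ := pvPal_eq_mir v s h hp hv0 hvlen hs
  -- v / 2^s is x or x+1
  have hq1 : x ≤ v / 2 ^ s := by
    have h1 : x * 2 ^ s ≤ pvMir s x := by
      rw [pvMir_val s x h hl1 hs]; omega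
    have : x * 2 ^ s ≤ v := by omega
    exact (Nat.le_div_iff_mul_le (Nat.pow_pos (by norm_num))).2 this
  have hq2 : v / 2 ^ s ≤ x + 1 := by
    have h1 : pvMir s (x+1) < (x+2) * 2 ^ s := by
      rw [pvMir_val s (x+1) h hl2 hs]
      have := pvMir_tail_lt s (x+1)
      nlinarith
    have hvlt : v < (x+2) * 2 ^ s := by omega
    have h2 : v / 2 ^ s < x + 2 :=
      (Nat.div_lt_iff_lt_mul (Nat.pow_pos (show 0 < 2 by norm_num))).2 hvlt
    omega
  have : v / 2 ^ s = x ∨ v / 2 ^ s = x + 1 := by omega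
  rcases this with hcase | hcase
  · rw [hcase] at heq
    omega
  · rw [hcase] at heq
    omega

theorem pvBitsLE_allones (h : Nat) : pvBitsLE (2 ^ h - 1) = List.replicate h '1' := by
  induction h with
  | zero => rw [pvBitsLE]; norm_num
  | succ m ih =>
    have h1 : 2 ^ (m+1) - 1 ≠ 0 := by
      have : 2 ≤ 2 ^ (m+1) := by
        have : 2 ^ 1 ≤ 2 ^ (m+1) := Nat.pow_le_pow_right (by norm_num) (by omega)
        simpa using this
      omega
    rw [pvBitsLE, dif_neg h1]
    have h2 : 2 ≤ 2 ^ (m+1) := by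
      have : 2 ^ 1 ≤ 2 ^ (m+1) := Nat.pow_le_pow_right (by norm_num) (by omega)
      simpa using this
    have hm : (2 ^ (m+1) - 1) % 2 = 1 := by
      rw [pow_succ]
      omega
    have hd : (2 ^ (m+1) - 1) / 2 = 2 ^ m - 1 := by
      rw [pow_succ]
      omega
    rw [hm, hd, ih]
    simp [List.replicate_succ]

theorem pvBitsLE_pow (h : Nat) : pvBitsLE (2 ^ h) = List.replicate h '0' ++ ['1'] := by
  induction h with
  | zero =>
    rw [pvBitsLE]; norm_num
    rw [pvBitsLE]; norm_num
  | succ m ih =>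
    have h1 : 2 ^ (m+1) ≠ 0 := by positivity
    rw [pvBitsLE, dif_neg h1]
    have hm : 2 ^ (m+1) % 2 = 0 := by rw [pow_succ]; omega
    have hd : 2 ^ (m+1) / 2 = 2 ^ m := by rw [pow_succ]; omega
    rw [hm, hd, ih]
    simp [List.replicate_succ]

theorem pvVal_replicate_one (m : Nat) : pvVal (List.replicate m '1') = 2 ^ m - 1 := by
  induction m with
  | zero => simp [pvVal]
  | succ t ih =>
    rw [List.replicate_succ, pvVal_cons, ih]
    simp [pvBval]
    have : 1 ≤ 2 ^ t := Nat.one_le_two_pow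
    rw [pow_succ]
    omega

theorem pvVal_replicate_zero (m : Nat) : pvVal (List.replicate m '0') = 0 := by
  induction m with
  | zero => simp [pvVal]
  | succ t ih =>
    rw [List.replicate_succ, pvVal_cons, ih]
    simp [pvBval]

-- top palindrome of bit-length h+s
theorem pvMir_top (s h : Nat) (hs : s ≤ h) (h1 : 1 ≤ h) :
    pvMir s (2 ^ h - 1) = 2 ^ (h + s) - 1 := by
  have hne : 2 ^ h - 1 ≠ 0 := by
    have : 2 ≤ 2 ^ h := by
      have : 2 ^ 1 ≤ 2 ^ h := Nat.pow_le_pow_right (by norm_num) h1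
      simpa using this
    omega
  have hlen : (pvBitsLE (2 ^ h - 1)).length = h := by rw [pvBitsLE_allones]; simp
  rw [pvMir_val s _ h hlen hs]
  have hM : pvM (2 ^ h - 1) = List.replicate h '1' := by
    unfold pvM
    rw [pvBitsLE_allones]
    simp
  rw [hM]
  rw [List.take_replicate, show min s h = s from by omega]
  rw [List.reverse_replicate, pvVal_replicate_one]
  have e1 : 1 ≤ 2 ^ s := Nat.one_le_two_pow
  have e2 : 1 ≤ 2 ^ h := Nat.one_le_two_pow
  have hprod : (2 ^ h - 1) * 2 ^ s = 2 ^ (h+s) - 2 ^ s := by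
    rw [Nat.sub_mul, ← pow_add]
    omega
  have e3 : 2 ^ s ≤ 2 ^ (h + s) := Nat.pow_le_pow_right (by norm_num) (by omega)
  rw [hprod]
  omega

-- bottom palindrome of bit-length h+s (s ≥ 1)
theorem pvMir_bot (s h : Nat) (hs : s ≤ h) (hs1 : 1 ≤ s) :
    pvMir s (2 ^ (h - 1)) = 2 ^ (h + s - 1) + 1 := by
  have h1 : 1 ≤ h := le_trans hs1 hs
  have hlen : (pvBitsLE (2 ^ (h-1))).length = h := by
    rw [pvBitsLE_pow]; simp; omega
  rw [pvMir_val s _ h hlen hs]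
  have hM : pvM (2 ^ (h-1)) = '1' :: List.replicate (h-1) '0' := by
    unfold pvM
    rw [pvBitsLE_pow]
    simp
  rw [hM]
  have htake : List.take s ('1' :: List.replicate (h-1) '0') = '1' :: List.replicate (s-1) '0' := by
    cases s with
    | zero => omega
    | succ t =>
      simp [List.take_replicate]
      congr 1
      omega
  rw [htake]
  have hrev : ('1' :: List.replicate (s-1) '0').reverse = List.replicate (s-1) '0' ++ ['1'] := by simp
  rw [hrev, pvVal_append, pvVal_replicate_zero]
  have h2 : pvVal ['1'] = 1 := by simp [pvVal, pvBval]
  rw [h2]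
  simp only [zero_mul, zero_add, List.length_cons, List.length_nil]
  rw [← pow_add]
  congr 2
  omega

theorem pvNotPal_pow (n : Nat) (hn : 1 ≤ n) : ¬ pvPal (2 ^ n) := by
  unfold pvPal
  rw [pvBitsLE_pow]
  intro h
  have h' : ('1' :: List.replicate n '0' : List Char) = List.replicate n '0' ++ ['1'] := by
    rw [List.reverse_append] at h
    simpa using h
  have h1 : (List.replicate n '0' ++ ['1']).getLast? = some '1' := by simp
  rw [← h'] at h1
  have hrep : ∀ m : Nat, (List.replicate (m+1) '0' : List Char).getLast? = some '0' := by
    intro m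
    induction m with
    | zero => rfl
    | succ t ih => rw [List.replicate_succ, List.getLast?_cons, ih]; simp
  cases n with
  | zero => omega
  | succ m =>
    rw [List.getLast?_cons, hrep m] at h1
    simp at h1

-- A's palindrome test, expressed through pvPal
theorem pvCheck_iff (v : Int) : check_if_binary_palindrome v = true ↔ pvPal v.toNat := by
  unfold check_if_binary_palindrome pvPal
  simp only [List.reverse_reverse, beq_iff_eq]

-- count of palindromes of bit-length n, as in Source B
def pvCnt (n : Int) : Int := 2 ^ ((PySem.Int.floordiv (n-1) 2).toNat)

theorem pvCnt_pos (n : Int) : 1 ≤ pvCnt n := one_le_pow₀ (by norm_num)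

-- pvFindLen invariant
theorem pvFindLen_inv (f : Nat) (rem n : Int) (hf : rem.toNat < f) (h0 : 0 ≤ rem) (hn : 2 ≤ n) :
    2 ≤ (pvFindLen f rem n).1 ∧ n ≤ (pvFindLen f rem n).1 ∧
    0 ≤ (pvFindLen f rem n).2 ∧ (pvFindLen f rem n).2 < pvCnt (pvFindLen f rem n).1 := by
  induction f generalizing rem n with
  | zero => omega
  | succ g ih =>
    rw [pvFindLen]
    by_cases hlt : rem < pvCnt n
    · simp only [pvCnt] at hlt
      simp only [hlt, if_pos]
      exact ⟨hn, le_refl n, h0, by simpa [pvCnt] using hlt⟩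
    · simp only [pvCnt] at hlt
      simp only [hlt, if_neg, not_false_iff]
      have hc := pvCnt_pos n
      simp only [pvCnt] at hc
      have h0' : 0 ≤ rem - 2 ^ ((PySem.Int.floordiv (n-1) 2).toNat) := by
        push_neg at hlt; omega
      have hf' : (rem - 2 ^ ((PySem.Int.floordiv (n-1) 2).toNat)).toNat < g := by omega
      have := ih (rem - 2 ^ ((PySem.Int.floordiv (n-1) 2).toNat)) (n+1) hf' h0' (by omega)
      exact ⟨this.1, by omega, this.2.2⟩


-- stepping rem by one either steps rem or moves to the next length

def pvStep (p : Int × Int) : Int × Int := if p.2 + 1 < pvCnt p.1 then (p.1, p.2+1) else (p.1+1, 0)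

theorem pvFindLen_succ (f f' : Nat) (rem n : Int) (hf : rem.toNat < f) (hf' : (rem+1).toNat < f')
    (h0 : 0 ≤ rem) (hn : 2 ≤ n) :
    pvFindLen f' (rem+1) n = pvStep (pvFindLen f rem n) := by
  induction f generalizing f' rem n with
  | zero => omega
  | succ g ih =>
    match f', hf' with
    | g'+1, hf' =>
    by_cases hlt : rem < pvCnt n
    · have hres : pvFindLen (g+1) rem n = (n, rem) := by
        rw [pvFindLen, if_pos (show rem < 2 ^ ((PySem.Int.floordiv (n-1) 2).toNat) from hlt)]
      rw [hres]
      by_cases hlt2 : rem + 1 < pvCnt n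
      · rw [pvFindLen, if_pos (show rem + 1 < 2 ^ ((PySem.Int.floordiv (n-1) 2).toNat) from hlt2)]
        simp [pvStep, hlt2]
      · have heq : rem + 1 = pvCnt n := by
          have := pvCnt_pos n; unfold pvCnt at *; omega
        rw [pvFindLen, if_neg (show ¬ (rem + 1 < 2 ^ ((PySem.Int.floordiv (n-1) 2).toNat)) from hlt2)]
        have hz : rem + 1 - 2 ^ ((PySem.Int.floordiv (n-1) 2).toNat) = 0 := by
          unfold pvCnt at heq; omega
        rw [hz]
        simp only [pvStep, hlt2, if_neg, not_false_iff]
        match g', hf' with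
        | 0, hx => omega
        | g''+1, _ =>
          rw [pvFindLen]
          rw [if_pos (show (0:Int) < 2 ^ ((PySem.Int.floordiv (n+1-1) 2).toNat) by positivity)]
    · have hc := pvCnt_pos n
      conv_rhs => rw [pvFindLen]
      rw [show (if rem < 2 ^ ((PySem.Int.floordiv (n-1) 2).toNat) then (n, rem)
            else pvFindLen g (rem - 2 ^ ((PySem.Int.floordiv (n-1) 2).toNat)) (n+1))
          = pvFindLen g (rem - 2 ^ ((PySem.Int.floordiv (n-1) 2).toNat)) (n+1) from
        if_neg (show ¬ (rem < 2 ^ ((PySem.Int.floordiv (n-1) 2).toNat)) from hlt)]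
      rw [pvFindLen, if_neg (show ¬ (rem + 1 < 2 ^ ((PySem.Int.floordiv (n-1) 2).toNat)) by
        unfold pvCnt at hlt; omega)]
      have e1 : rem + 1 - 2 ^ ((PySem.Int.floordiv (n-1) 2).toNat)
          = (rem - 2 ^ ((PySem.Int.floordiv (n-1) 2).toNat)) + 1 := by ring
      rw [e1]
      have hcnt1 : (1:Int) ≤ 2 ^ ((PySem.Int.floordiv (n-1) 2).toNat) := one_le_pow₀ (by norm_num)
      have hrge : 2 ^ ((PySem.Int.floordiv (n-1) 2).toNat) ≤ rem := by
        have hlt' : ¬ rem < 2 ^ ((PySem.Int.floordiv (n-1) 2).toNat) := hlt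
        omega
      exact ih g' (rem - 2 ^ ((PySem.Int.floordiv (n-1) 2).toNat)) (n+1)
        (by omega) (by omega) (by omega) (by omega)

-- size bound for the length found: 2^n' ≤ 2^n + 4*rem^2
theorem pvFindLen_bound (f : Nat) (rem n : Int) (hf : rem.toNat < f) (h0 : 0 ≤ rem) (hn : 2 ≤ n) :
    (2:Int) ^ ((pvFindLen f rem n).1.toNat) ≤ 2 ^ n.toNat + 4 * rem * rem := by
  induction f generalizing rem n with
  | zero => omega
  | succ g ih =>
    rw [pvFindLen]
    by_cases hlt : rem < 2 ^ ((PySem.Int.floordiv (n-1) 2).toNat)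
    · rw [if_pos hlt]
      nlinarith [h0]
    · rw [if_neg hlt]
      have hcnt1 : (1:Int) ≤ 2 ^ ((PySem.Int.floordiv (n-1) 2).toNat) := one_le_pow₀ (by norm_num)
      have hrge : 2 ^ ((PySem.Int.floordiv (n-1) 2).toNat) ≤ rem := by omega
      have hstep := ih (rem - 2 ^ ((PySem.Int.floordiv (n-1) 2).toNat)) (n+1)
        (by omega) (by omega) (by omega)
      -- 2^(n+1) = 2 * 2^n and cnt^2 ≥ 2^(n-2) i.e. 2^n ≤ 4*cnt*cnt
      have he1 : (n+1).toNat = n.toNat + 1 := by omega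
      rw [he1, pow_succ] at hstep
      have hexp : n.toNat ≤ 2 * ((PySem.Int.floordiv (n-1) 2).toNat) + 2 := by
        have : PySem.Int.floordiv (n-1) 2 = (n-1) / 2 := PySem.Int.floordiv_eq_ediv_of_pos (by norm_num)
        omega
      have hc2 : (2:Int) ^ n.toNat ≤ 4 * (2 ^ ((PySem.Int.floordiv (n-1) 2).toNat) * 2 ^ ((PySem.Int.floordiv (n-1) 2).toNat)) := by
        have : (2:Int) ^ n.toNat ≤ 2 ^ (2 * ((PySem.Int.floordiv (n-1) 2).toNat) + 2) :=
          pow_le_pow_right₀ (by norm_num) hexp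
        calc (2:Int) ^ n.toNat ≤ 2 ^ (2 * ((PySem.Int.floordiv (n-1) 2).toNat) + 2) := this
          _ = 4 * (2 ^ ((PySem.Int.floordiv (n-1) 2).toNat) * 2 ^ ((PySem.Int.floordiv (n-1) 2).toNat)) := by
            rw [two_mul, pow_add, pow_add]; ring
      nlinarith [hstep, hc2, hrge, hcnt1]

-- the rev loop computes the value of the low-s bit reversal
theorem pvRevLoop_eq (s : Nat) (x : Nat) (r : Int) (hl : (pvBitsLE x).length = s) :
    pvRevLoop s (x : Int) r = r * 2 ^ s + (pvVal (pvBitsLE x) : Int) := by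
  induction s generalizing x r with
  | zero =>
    have hx : x = 0 := by
      by_contra hc
      have := pvBitsLE_ne_nil x hc
      simp [List.length_eq_zero_iff] at hl
      exact this hl
    subst hx
    rw [pvRevLoop]
    rw [show pvBitsLE 0 = [] from by rw [pvBitsLE]; norm_num]
    simp [pvVal]
  | succ t ih =>
    have hx : x ≠ 0 := by
      intro hc
      subst hc
      rw [show pvBitsLE 0 = [] from by rw [pvBitsLE]; norm_num] at hl
      simp at hl
    rw [pvRevLoop]
    have hfd : PySem.Int.floordiv (x : Int) 2 = ((x / 2 : Nat) : Int) := by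
      exact_mod_cast PySem.Int.floordiv_natCast x 2
    have hmd : PySem.Int.mod (x : Int) 2 = ((x % 2 : Nat) : Int) := by
      exact_mod_cast PySem.Int.mod_natCast x 2
    rw [hfd, hmd]
    have hbits : pvBitsLE x = (if x % 2 = 1 then '1' else '0') :: pvBitsLE (x / 2) := by
      rw [pvBitsLE, dif_neg hx]
    have hlen2 : (pvBitsLE (x / 2)).length = t := by
      rw [hbits] at hl; simpa using hl
    rw [ih (x/2) _ hlen2, hbits, pvVal_cons, hlen2]
    have hbv : (pvBval (if x % 2 = 1 then '1' else '0') : Int) = ((x % 2 : Nat) : Int) := by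
      rcases Nat.mod_two_eq_zero_or_one x with h2 | h2 <;> simp [h2, pvBval]
    push_cast
    push_cast at hbv
    rw [← hbv]
    ring

-- (take s (pvM x)).reverse is the bit list of the shifted-down x
theorem pvTake_reverse (x s t : Nat) (hlen : (pvBitsLE x).length = s + t) :
    (List.take s (pvM x)).reverse = pvBitsLE (x / 2 ^ t) := by
  rw [pvBitsLE_div_pow]
  unfold pvM
  rw [show List.drop t (pvBitsLE x) = ((List.drop t (pvBitsLE x)).reverse).reverse from by simp]
  rw [List.reverse_drop, hlen]
  congr 2
  omega

def pvStateK (k : Int) : Int × Int := pvFindLen ((k-2).toNat + 1) (k-2) 2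
def pvNK (k : Int) : Nat := (pvStateK k).1.toNat
def pvSK (k : Int) : Nat := pvNK k / 2
def pvHK (k : Int) : Nat := pvNK k - pvNK k / 2
def pvXK (k : Int) : Nat := 2 ^ (pvHK k - 1) + (pvStateK k).2.toNat

theorem pvStateK_inv (k : Int) (hk : 2 ≤ k) :
    2 ≤ (pvStateK k).1 ∧ 0 ≤ (pvStateK k).2 ∧ (pvStateK k).2 < pvCnt (pvStateK k).1 := by
  have := pvFindLen_inv ((k-2).toNat + 1) (k-2) 2 (by omega) (by omega) (by omega)
  exact ⟨this.1, this.2.2⟩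

theorem pvCnt_stateK (k : Int) (hk : 2 ≤ k) :
    pvCnt (pvStateK k).1 = ((2 ^ (pvHK k - 1) : Nat) : Int) := by
  obtain ⟨h1, _, _⟩ := pvStateK_inv k hk
  unfold pvCnt pvHK pvNK
  have hfd : PySem.Int.floordiv ((pvStateK k).1 - 1) 2 = ((pvStateK k).1 - 1) / 2 :=
    PySem.Int.floordiv_eq_ediv_of_pos (by norm_num)
  rw [hfd]
  have he : (((pvStateK k).1 - 1) / 2).toNat = (pvStateK k).1.toNat - (pvStateK k).1.toNat / 2 - 1 := by
    omega
  rw [he]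
  push_cast
  rfl

theorem pvXK_facts (k : Int) (hk : 2 ≤ k) :
    (pvBitsLE (pvXK k)).length = pvHK k ∧ pvXK k ≠ 0 ∧ 1 ≤ pvHK k ∧
    pvSK k ≤ pvHK k ∧ pvHK k ≤ pvSK k + 1 ∧ pvNK k = pvHK k + pvSK k ∧ 2 ≤ pvNK k := by
  obtain ⟨h1, h2, h3⟩ := pvStateK_inv k hk
  rw [pvCnt_stateK k hk] at h3
  have hN2 : 2 ≤ pvNK k := by unfold pvNK; omega
  have hH1 : 1 ≤ pvHK k := by unfold pvHK; omega
  have hrem : (pvStateK k).2.toNat < 2 ^ (pvHK k - 1) := by omega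
  have hxlo : 2 ^ (pvHK k - 1) ≤ pvXK k := by unfold pvXK; omega
  have hxhi : pvXK k < 2 ^ (pvHK k) := by
    unfold pvXK
    have : 2 ^ (pvHK k - 1) + 2 ^ (pvHK k - 1) = 2 ^ (pvHK k) := by
      rw [← two_mul, ← pow_succ']
      congr 1
      omega
    omega
  have hx0 : pvXK k ≠ 0 := by
    have : 1 ≤ 2 ^ (pvHK k - 1) := Nat.one_le_two_pow
    omega
  refine ⟨pvBitsLE_length_eq _ _ (by simpa using hxlo) hxhi hH1, hx0, hH1, ?_, ?_, ?_, hN2⟩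
  · unfold pvHK pvSK; omega
  · unfold pvHK pvSK; omega
  · unfold pvHK pvSK; omega

theorem pvAlt_val (k : Int) (hk : 2 ≤ k) :
    give_kth_binary_palindrome_alt k = ((pvMir (pvSK k) (pvXK k) : Nat) : Int) := by
  obtain ⟨hlen, hx0, hH1, hSH, hHS1, hNHS, hN2⟩ := pvXK_facts k hk
  obtain ⟨h1, h2, h3⟩ := pvStateK_inv k hk
  unfold give_kth_binary_palindrome_alt
  rw [if_neg (by omega)]
  show (2 ^ ((pvStateK k).1 - PySem.Int.floordiv (pvStateK k).1 2 - 1).toNat + (pvStateK k).2)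
      * 2 ^ ((PySem.Int.floordiv (pvStateK k).1 2).toNat)
      + pvRevLoop ((PySem.Int.floordiv (pvStateK k).1 2).toNat)
          (PySem.Int.floordiv
            (2 ^ ((pvStateK k).1 - PySem.Int.floordiv (pvStateK k).1 2 - 1).toNat + (pvStateK k).2)
            (2 ^ (PySem.Int.mod (pvStateK k).1 2).toNat)) 0
      = ((pvMir (pvSK k) (pvXK k) : Nat) : Int)
  have hn1 : (pvStateK k).1 = ((pvNK k : Nat) : Int) := by unfold pvNK; omega
  have hfd : PySem.Int.floordiv (pvStateK k).1 2 = ((pvNK k / 2 : Nat) : Int) := by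
    rw [hn1]; exact_mod_cast PySem.Int.floordiv_natCast (pvNK k) 2
  have hmd : PySem.Int.mod (pvStateK k).1 2 = ((pvNK k % 2 : Nat) : Int) := by
    rw [hn1]; exact_mod_cast PySem.Int.mod_natCast (pvNK k) 2
  rw [hfd, hmd, hn1]
  have htn1 : (((pvNK k : Nat) : Int) - ((pvNK k / 2 : Nat) : Int) - 1).toNat = pvHK k - 1 := by
    unfold pvHK; omega
  have htn2 : (((pvNK k / 2 : Nat) : Int)).toNat = pvSK k := by unfold pvSK; omega
  have htn3 : (((pvNK k % 2 : Nat) : Int)).toNat = pvNK k % 2 := by omega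
  rw [htn1, htn2, htn3]
  have hhalf : (2 ^ (pvHK k - 1) + (pvStateK k).2 : Int) = ((pvXK k : Nat) : Int) := by
    unfold pvXK; push_cast; omega
  rw [hhalf]
  have hpow : ((2 : Int) ^ (pvNK k % 2)) = ((2 ^ (pvNK k % 2) : Nat) : Int) := by push_cast; rfl
  rw [hpow]
  have hx : PySem.Int.floordiv ((pvXK k : Nat) : Int) ((2 ^ (pvNK k % 2) : Nat) : Int)
      = ((pvXK k / 2 ^ (pvNK k % 2) : Nat) : Int) := by
    exact_mod_cast PySem.Int.floordiv_natCast (pvXK k) (2 ^ (pvNK k % 2))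
  rw [hx]
  have hlenx : (pvBitsLE (pvXK k / 2 ^ (pvNK k % 2))).length = pvSK k := by
    rw [pvBitsLE_div_pow, List.length_drop, hlen]
    omega
  rw [pvRevLoop_eq (pvSK k) _ 0 hlenx]
  have hmir : pvMir (pvSK k) (pvXK k)
      = pvXK k * 2 ^ pvSK k + pvVal (pvBitsLE (pvXK k / 2 ^ (pvNK k % 2))) := by
    rw [pvMir_val (pvSK k) (pvXK k) (pvHK k) hlen hSH]
    congr 1
    rw [pvTake_reverse (pvXK k) (pvSK k) (pvNK k % 2) (by rw [hlen]; omega)]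
  rw [hmir]
  push_cast
  ring

theorem pvAlt_le_one (k : Int) (hk : k ≤ 1) : give_kth_binary_palindrome_alt k = 1 := by
  unfold give_kth_binary_palindrome_alt
  rw [if_pos hk]

theorem pvAlt_pal (k : Int) (hk : 1 ≤ k) :
    pvPal ((give_kth_binary_palindrome_alt k).toNat) ∧ 1 ≤ give_kth_binary_palindrome_alt k := by
  by_cases h1 : k ≤ 1
  · rw [pvAlt_le_one k h1]
    refine ⟨?_, by norm_num⟩
    have hb : pvBitsLE 1 = ['1'] := by
      rw [pvBitsLE]; norm_num
      rw [pvBitsLE]; norm_num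
    unfold pvPal
    rw [show (1:Int).toNat = 1 from rfl, hb]
    rfl
  · have hk2 : 2 ≤ k := by omega
    obtain ⟨hlen, hx0, hH1, hSH, hHS1, hNHS, hN2⟩ := pvXK_facts k hk2
    rw [pvAlt_val k hk2]
    constructor
    · rw [Int.toNat_natCast]
      exact pvMir_pal (pvSK k) (pvXK k) (pvHK k) hx0 hlen hSH hHS1
    · have := pvMir_lb (pvSK k) (pvXK k) (pvHK k) hlen hSH hx0
      have h2 : 1 ≤ 2 ^ (pvHK k + pvSK k - 1) := Nat.one_le_two_pow
      omega

theorem pvSucc (k : Int) (hk : 1 ≤ k) :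
    give_kth_binary_palindrome_alt k < give_kth_binary_palindrome_alt (k+1) ∧
    ∀ w : Int, give_kth_binary_palindrome_alt k < w → w < give_kth_binary_palindrome_alt (k+1) →
      ¬ pvPal w.toNat := by
  by_cases h1 : k ≤ 1
  · have hk1 : k = 1 := by omega
    subst hk1
    have ha1 : give_kth_binary_palindrome_alt 1 = 1 := pvAlt_le_one 1 (by norm_num)
    have ha2 : give_kth_binary_palindrome_alt 2 = 3 := by decide
    rw [show (1:Int)+1 = 2 from by norm_num, ha1, ha2]
    refine ⟨by norm_num, ?_⟩
    intro w hw1 hw2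
    have hw : w = 2 := by omega
    subst hw
    have hb : pvBitsLE 2 = ['0', '1'] := by
      rw [pvBitsLE]; norm_num
      rw [pvBitsLE]; norm_num
      rw [pvBitsLE]; norm_num
    unfold pvPal
    rw [show (2:Int).toNat = 2 from rfl, hb]
    simp
  · have hk2 : 2 ≤ k := by omega
    obtain ⟨hlen, hx0, hH1, hSH, hHS1, hNHS, hN2⟩ := pvXK_facts k hk2
    obtain ⟨hlen', hx0', hH1', hSH', hHS1', hNHS', hN2'⟩ := pvXK_facts (k+1) (by omega)
    obtain ⟨hi1, hi2, hi3⟩ := pvStateK_inv k hk2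
    have hstep : pvStateK (k+1) = pvStep (pvStateK k) := by
      unfold pvStateK
      have he : k + 1 - 2 = (k - 2) + 1 := by ring
      rw [he]
      exact pvFindLen_succ ((k-2).toNat + 1) (((k-2)+1).toNat + 1) (k-2) 2
        (by omega) (by omega) (by omega) (by norm_num)
    rw [pvAlt_val k hk2, pvAlt_val (k+1) (by omega)]
    by_cases hcase : (pvStateK k).2 + 1 < pvCnt (pvStateK k).1
    · -- same bit-length, next half
      have hst : pvStateK (k+1) = ((pvStateK k).1, (pvStateK k).2 + 1) := by
        rw [hstep]; unfold pvStep; rw [if_pos hcase]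
      have hNeq : pvNK (k+1) = pvNK k := by unfold pvNK; rw [hst]
      have hSeq : pvSK (k+1) = pvSK k := by unfold pvSK; rw [hNeq]
      have hHeq : pvHK (k+1) = pvHK k := by unfold pvHK; rw [hNeq]
      have hXeq : pvXK (k+1) = pvXK k + 1 := by
        unfold pvXK
        rw [hHeq, hst]
        show 2 ^ (pvHK k - 1) + ((pvStateK k).2 + 1).toNat
          = 2 ^ (pvHK k - 1) + (pvStateK k).2.toNat + 1
        omega
      rw [hSeq, hXeq]
      have hlen1 : (pvBitsLE (pvXK k + 1)).length = pvHK k := by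
        rw [← hXeq, ← hHeq]; exact hlen'
      have hmono := pvMir_mono (pvSK k) (pvXK k) (pvXK k + 1) (pvHK k) (pvHK k)
        hlen hlen1 hSH hSH (by omega)
      refine ⟨by exact_mod_cast hmono, ?_⟩
      intro w hw1 hw2
      have hw0 : 0 ≤ w := by
        have : (0:Int) ≤ ((pvMir (pvSK k) (pvXK k) : Nat) : Int) := by positivity
        omega
      have hwn1 : pvMir (pvSK k) (pvXK k) < w.toNat := by omega
      have hwn2 : w.toNat < pvMir (pvSK k) (pvXK k + 1) := by omega
      exact pvGap_same (pvSK k) (pvXK k) (pvHK k) w.toNat hx0 hlen hlen1 hSH hHS1 hwn1 hwn2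
    · -- move to next bit-length
      have hst : pvStateK (k+1) = ((pvStateK k).1 + 1, 0) := by
        rw [hstep]; unfold pvStep; rw [if_neg hcase]
      have hNeq : pvNK (k+1) = pvNK k + 1 := by
        unfold pvNK; rw [hst]; omega
      have hXtop : pvXK k = 2 ^ (pvHK k) - 1 := by
        unfold pvXK
        rw [pvCnt_stateK k hk2] at hi3 hcase
        have hr : (pvStateK k).2.toNat = 2 ^ (pvHK k - 1) - 1 := by omega
        rw [hr]
        have h2 : 2 ^ (pvHK k - 1) + 2 ^ (pvHK k - 1) = 2 ^ (pvHK k) := by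
          rw [← two_mul, ← pow_succ']
          congr 1
          omega
        have := Nat.one_le_two_pow (n := pvHK k - 1)
        omega
      have hXbot : pvXK (k+1) = 2 ^ (pvHK (k+1) - 1) := by
        unfold pvXK
        rw [hst]
        rfl
      have htop : pvMir (pvSK k) (pvXK k) = 2 ^ (pvNK k) - 1 := by
        rw [hXtop, pvMir_top (pvSK k) (pvHK k) hSH hH1, hNHS]
      have hS1' : 1 ≤ pvSK (k+1) := by
        unfold pvSK
        rw [hNeq]
        omega
      have hbot : pvMir (pvSK (k+1)) (pvXK (k+1)) = 2 ^ (pvNK k) + 1 := by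
        rw [hXbot, pvMir_bot (pvSK (k+1)) (pvHK (k+1)) hSH' hS1']
        have he : pvHK (k+1) + pvSK (k+1) - 1 = pvNK k := by omega
        rw [he]
      rw [htop, hbot]
      have hp1 : 1 ≤ 2 ^ (pvNK k) := Nat.one_le_two_pow
      refine ⟨by
        have hlt : (2 ^ (pvNK k) - 1 : Nat) < 2 ^ (pvNK k) + 1 := by omega
        exact_mod_cast hlt, ?_⟩
      intro w hw1 hw2
      have hw : w.toNat = 2 ^ (pvNK k) := by omega
      rw [hw]
      exact pvNotPal_pow (pvNK k) (by omega)

theorem pvAlt_mono (c k : Int) (h1 : 1 ≤ c) (h2 : c ≤ k) :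
    give_kth_binary_palindrome_alt c ≤ give_kth_binary_palindrome_alt k := by
  have H : ∀ d : Nat, ∀ m : Int, m = c + d → give_kth_binary_palindrome_alt c ≤ give_kth_binary_palindrome_alt m := by
    intro d
    induction d with
    | zero => intro m hm; simp at hm; rw [hm]
    | succ t ih =>
      intro m hm
      have h3 := ih (c + t) (by push_cast; ring)
      have h4 := (pvSucc (c + t) (by omega)).1
      have he : m = (c + t) + 1 := by rw [hm]; push_cast; ring
      rw [he]
      omega
  exact H (k - c).toNat k (by omega)

theorem pvAlt_bound (k : Int) (hk : 2 ≤ k) :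
    give_kth_binary_palindrome_alt k ≤ 4 * k * k + 8 := by
  obtain ⟨hlen, hx0, hH1, hSH, hHS1, hNHS, hN2⟩ := pvXK_facts k hk
  rw [pvAlt_val k hk]
  have hub := pvMir_ub (pvSK k) (pvXK k) (pvHK k) hlen hSH
  have hcast : ((pvMir (pvSK k) (pvXK k) : Nat) : Int) < ((2 ^ (pvHK k + pvSK k) : Nat) : Int) := by
    exact_mod_cast hub
  have hb := pvFindLen_bound ((k-2).toNat + 1) (k-2) 2 (by omega) (by omega) (by norm_num)
  have hb2 : (2:Int) ^ (pvNK k) ≤ 4 + 4 * (k-2) * (k-2) := by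
    unfold pvNK pvStateK
    have : ((2:Int)).toNat = 2 := rfl
    calc (2:Int) ^ ((pvFindLen ((k-2).toNat + 1) (k-2) 2).1.toNat)
        ≤ 2 ^ ((2:Int)).toNat + 4 * (k-2) * (k-2) := hb
      _ = 4 + 4 * (k-2) * (k-2) := by rw [this]; norm_num
  have hc2 : ((2 ^ (pvHK k + pvSK k) : Nat) : Int) = (2:Int) ^ (pvNK k) := by
    rw [← hNHS]
    push_cast
    rfl
  have : 4 + 4 * (k-2) * (k-2) ≤ 4 * k * k + 8 := by nlinarith
  omega

-- the main loop invariant: starting below or at the c-th palindrome with no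
-- palindromes in [v, alt c), the loop returns alt k
theorem pvLoop_main (f : Nat) (c v k : Int) (h1 : 1 ≤ c) (h2 : c ≤ k) (hv1 : 1 ≤ v)
    (hv2 : v ≤ give_kth_binary_palindrome_alt c)
    (hnp : ∀ w : Int, v ≤ w → w < give_kth_binary_palindrome_alt c → check_if_binary_palindrome w = false)
    (hf : (give_kth_binary_palindrome_alt k - v).toNat < f) :
    pvLoopA f c v k = give_kth_binary_palindrome_alt k := by
  induction f generalizing c v with
  | zero => omega
  | succ g ih =>
    have hck := pvAlt_mono c k h1 h2
    rw [pvLoopA]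
    rw [if_pos h2]
    rcases eq_or_lt_of_le hv2 with heq | hlt
    · -- v is the c-th palindrome
      have hchk : check_if_binary_palindrome v = true := by
        rw [pvCheck_iff]
        have := (pvAlt_pal c h1).1
        rw [← heq] at this
        exact this
      rw [hchk]
      by_cases hck2 : c = k
      · rw [if_neg (show ¬ (c ≠ k) from by omega)]
        rw [heq, hck2]
        simp
      · rw [if_pos hck2]
        have hlt2 : c < k := by omega
        have hsucc := pvSucc c h1
        apply ih (c+1) (v+1) (by omega) (by omega) (by omega) (by omega)
        · intro w hw1 hw2
          have hpal := hsucc.2 w (by omega) hw2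
          rcases Bool.eq_false_or_eq_true (check_if_binary_palindrome w) with hb | hb
          · exact absurd ((pvCheck_iff w).1 hb) hpal
          · exact hb
        · have hstrict : give_kth_binary_palindrome_alt c < give_kth_binary_palindrome_alt k := by
            have := pvAlt_mono (c+1) k (by omega) (by omega)
            omega
          omega
    · -- v is below the c-th palindrome: not a palindrome
      have hchk : check_if_binary_palindrome v = false := hnp v (le_refl v) hlt
      rw [hchk]
      simp only [Bool.false_eq_true, if_neg, not_false_iff]
      apply ih c (v+1) h1 h2 (by omega) (by omega)
      · intro w hw1 hw2
        exact hnp w (by omega) hw2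
      · omega

-- ===== VERDICT (by name: the statement is the Claim_ definition above) =====
theorem give_kth_binary_palindrome_spec : Claim_equal_give_kth_binary_palindrome := by
  unfold Claim_equal_give_kth_binary_palindrome
  intro k _
  unfold Spec_give_kth_binary_palindrome give_kth_binary_palindrome
  by_cases hk1 : k = 1
  · rw [if_neg (by simp [hk1])]
    rw [hk1, pvAlt_le_one 1 (by norm_num)]
  · rw [if_pos hk1]
    by_cases hk0 : k ≤ 0
    · -- the loop body never runs: counter = 1 > k
      have hkk : 0 ≤ 4*k*k := by nlinarith
      obtain ⟨g, hg⟩ : ∃ g, (4*k*k+8).toNat = g + 1 := ⟨(4*k*k+8).toNat - 1, by omega⟩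
      rw [hg, pvLoopA, if_neg (show ¬ ((1:Int) ≤ k) from by omega),
        pvAlt_le_one k (by omega)]
    · have hk2 : 2 ≤ k := by omega
      apply pvLoop_main _ 1 1 k (by norm_num) (by omega) (by norm_num)
      · have := (pvAlt_pal 1 (by norm_num)).2
        rw [pvAlt_le_one 1 (by norm_num)]
      · intro w hw1 hw2
        rw [pvAlt_le_one 1 (by norm_num)] at hw2
        omega
      · have hb := pvAlt_bound k hk2
        have h1 := (pvAlt_pal k (by omega)).2
        have hkk : 0 ≤ 4*k*k := by nlinarith
        omega
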